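-- pv_equiv track=rewrite | github.com/meghanavemala/scrapping_website | data_processor.py | extract_location_details
-- ===== SOURCE A (Python) =====
-- from typing import Dict, List, Any, Optional, Set
--
-- def extract_location_details(location: str) -> Dict[str, str]:
--     """Extract detailed location information."""
--     location_info = {
--         "city": "",
--         "district": "",
--         "state": "Karnataka",
--         "region": ""
--     }
--
--     if not location:
--         return location_info
--
--     location_lower = location.lower()
--
--     # Karnataka cities and their districts
--     city_district_map = {
--         'bangalore': 'Bangalore Urban',
--         'mysore': 'Mysuru',
--         'hubli': 'Dharwad',
--         'dharwad': 'Dharwad',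
--         'belgaum': 'Belagavi',
--         'mangalore': 'Dakshina Kannada',
--         'gulbarga': 'Kalaburagi',
--         'davangere': 'Davanagere',
--         'bellary': 'Ballari',
--         'bijapur': 'Vijayapura',
--         'shimoga': 'Shivamogga',
--         'tumkur': 'Tumakuru'
--     }
--
--     for city, district in city_district_map.items():
--         if city in location_lower:
--             location_info["city"] = city.title()
--             location_info["district"] = district
--             break
--
--     # Determine region
--     if location_info["city"] in ['Bangalore', 'Mysore', 'Tumkur']:
--         location_info["region"] = "South Karnataka"
--     elif location_info["city"] in ['Hubli', 'Dharwad', 'Belgaum']: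
--         location_info["region"] = "North Karnataka"
--     elif location_info["city"] in ['Mangalore', 'Udupi']:
--         location_info["region"] = "Coastal Karnataka"
--
--     return location_info
-- ===== SOURCE B (Python) =====
-- # Text-driven two-phase algorithm: one left-to-right pass over the string computes, for every
-- # table entry at once, whether its name starts at some position (per-key hit flags); a second
-- # phase picks the highest-priority hit. A instead scans the table and substring-searches per key.
-- _TABLE = [
--     ('bangalore', 'Bangalore Urban', 'South Karnataka'),
--     ('mysore', 'Mysuru', 'South Karnataka'),
--     ('hubli', 'Dharwad', 'North Karnataka'),
--     ('dharwad', 'Dharwad', 'North Karnataka'),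
--     ('belgaum', 'Belagavi', 'North Karnataka'),
--     ('mangalore', 'Dakshina Kannada', 'Coastal Karnataka'),
--     ('gulbarga', 'Kalaburagi', ''),
--     ('davangere', 'Davanagere', ''),
--     ('bellary', 'Ballari', ''),
--     ('bijapur', 'Vijayapura', ''),
--     ('shimoga', 'Shivamogga', ''),
--     ('tumkur', 'Tumakuru', 'South Karnataka'),
-- ]
--
-- def extract_location_details(location: str):
--     info = {"city": "", "district": "", "state": "Karnataka", "region": ""}
--     if not location:
--         return info
--     low = location.lower()
--     # phase 1: walk the text once; at each position mark every name that starts there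
--     hits = [False] * len(_TABLE)
--     for p in range(len(low)):
--         hits = [h or low.startswith(city, p) for h, (city, _d, _r) in zip(hits, _TABLE)]
--     # phase 2: the earliest table entry that was hit wins
--     for hit, (city, district, region) in zip(hits, _TABLE):
--         if hit:
--             info["city"] = city.title()
--             info["district"] = district
--             info["region"] = region
--             break
--     return info
-- ===== Notes on version B (the rewrite author's own statement) =====
-- stated objective: alternative
-- what changed: Inverted the traversal: instead of A's table-driven first-match scan (per-key substring search, then an if/elif region phase), B makes one text-driven pass over the string positions computing hit flags for all table entries simultaneously (prefix test per position), then a separate priority-selection phase picks the earliest hit entry with its district and region.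
import Mathlib
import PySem

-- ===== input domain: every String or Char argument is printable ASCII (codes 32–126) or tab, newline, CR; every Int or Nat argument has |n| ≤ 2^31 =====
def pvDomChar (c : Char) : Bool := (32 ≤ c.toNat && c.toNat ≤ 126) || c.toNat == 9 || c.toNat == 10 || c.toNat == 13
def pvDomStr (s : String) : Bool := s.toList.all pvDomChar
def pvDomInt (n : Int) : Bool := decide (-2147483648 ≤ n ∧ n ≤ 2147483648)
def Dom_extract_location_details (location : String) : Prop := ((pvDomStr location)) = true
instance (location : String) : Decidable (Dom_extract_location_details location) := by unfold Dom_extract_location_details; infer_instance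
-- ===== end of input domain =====

-- B inverts the traversal: one text-driven pass over the string positions computes hit flags for
-- all table entries at once, then a separate selection pass picks the earliest hit (objective: alternative).

-- str.title() for the single lowercase ASCII words it is applied to here (exact on those inputs)
def pyTitleWord (s : String) : String :=
  match s.toList with
  | [] => ""
  | c :: cs => String.ofList (PySem.Chars.upperChar c :: cs)

-- ===== PORT A =====
-- the loop 'for city, district in city_district_map.items(): if city in low: …; break'
def aLoop (low : String) (d : PySem.Dict String String) :
    List (String × String) → PySem.Dict String String
  | [] => d
  | (city, district) :: rest =>
    if PySem.Str.isIn city low then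
      (d.insert "city" (pyTitleWord city)).insert "district" district
    else aLoop low d rest

def extract_location_details (location : String) : List (String × String) :=
  let info : PySem.Dict String String :=
    PySem.Dict.ofList [("city", ""), ("district", ""), ("state", "Karnataka"), ("region", "")]
  if location = "" then info.items
  else
    let low := PySem.Str.lower location
    let info := aLoop low info
      [("bangalore", "Bangalore Urban"), ("mysore", "Mysuru"), ("hubli", "Dharwad"),
       ("dharwad", "Dharwad"), ("belgaum", "Belagavi"), ("mangalore", "Dakshina Kannada"),
       ("gulbarga", "Kalaburagi"), ("davangere", "Davanagere"), ("bellary", "Ballari"),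
       ("bijapur", "Vijayapura"), ("shimoga", "Shivamogga"), ("tumkur", "Tumakuru")]
    -- location_info["city"]: the key is always present, so getD is exact here
    let city := PySem.Dict.getD info "city" ""
    let info :=
      if ["Bangalore", "Mysore", "Tumkur"].contains city then
        info.insert "region" "South Karnataka"
      else if ["Hubli", "Dharwad", "Belgaum"].contains city then
        info.insert "region" "North Karnataka"
      else if ["Mangalore", "Udupi"].contains city then
        info.insert "region" "Coastal Karnataka"
      else info
    info.items

-- ===== PORT B =====
def bTable : List (String × String × String) :=
  [("bangalore", "Bangalore Urban", "South Karnataka"),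
   ("mysore", "Mysuru", "South Karnataka"),
   ("hubli", "Dharwad", "North Karnataka"),
   ("dharwad", "Dharwad", "North Karnataka"),
   ("belgaum", "Belagavi", "North Karnataka"),
   ("mangalore", "Dakshina Kannada", "Coastal Karnataka"),
   ("gulbarga", "Kalaburagi", ""),
   ("davangere", "Davanagere", ""),
   ("bellary", "Ballari", ""),
   ("bijapur", "Vijayapura", ""),
   ("shimoga", "Shivamogga", ""),
   ("tumkur", "Tumakuru", "South Karnataka")]

-- phase 1: 'for p in range(len(low)): hits = [h or low.startswith(city, p) for …]'
-- Python's low.startswith(city, p) with 0 ≤ p < len(low) is exactly 'city.toList <+: low.drop p',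
-- i.e. PySem.Chars.startswith (low.drop p) city.toList
def bHits (low : List Char) : List Bool :=
  (List.range low.length).foldl
    (fun hs p => List.zipWith
      (fun h (t : String × String × String) =>
        h || PySem.Chars.startswith (List.drop p low) t.1.toList) hs bTable)
    (List.replicate bTable.length false)

-- phase 2: 'for hit, (city, district, region) in zip(hits, _TABLE): if hit: …; break'
def bSelect : List Bool → List (String × String × String) → List (String × String)
  | h :: hs, (city, district, region) :: rest =>
    if h then
      [("city", pyTitleWord city), ("district", district),
       ("state", "Karnataka"), ("region", region)]
    else bSelect hs rest
  | _, _ => [("city", ""), ("district", ""), ("state", "Karnataka"), ("region", "")]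

def extract_location_details_alt (location : String) : List (String × String) :=
  if location = "" then
    [("city", ""), ("district", ""), ("state", "Karnataka"), ("region", "")]
  else bSelect (bHits (PySem.Str.lower location).toList) bTable

-- ===== PRECONDITION & SPEC =====
def Spec_extract_location_details (location : String) (out : List (String × String)) : Prop := out = extract_location_details_alt location
instance (location : String) (out : List (String × String)) : Decidable (Spec_extract_location_details location out) := by unfold Spec_extract_location_details; infer_instance

-- ===== CLAIM (what is proved, stated in full; the proofs are below) =====
def Claim_equal_extract_location_details : Prop := ∀ (location : String), Dom_extract_location_details location → Spec_extract_location_details location (extract_location_details location)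

-- ===== LEMMAS AND PROOFS =====

theorem zipWith_left_of_len {α β : Type} : ∀ (as : List α) (bs : List β), as.length ≤ bs.length →
    List.zipWith (fun a (_ : β) => a) as bs = as := by
  intro as
  induction as with
  | nil => intro bs _; simp
  | cons a as ih =>
    intro bs h
    cases bs with
    | nil => simp at h
    | cons b bs => simpa using ih bs (by simpa using h)

theorem zipWith_zipWith_same {α β γ δ : Type} (g : γ → β → δ) (g' : α → β → γ) :
    ∀ (as : List α) (bs : List β),
    List.zipWith g (List.zipWith g' as bs) bs = List.zipWith (fun a b => g (g' a b) b) as bs := by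
  intro as
  induction as with
  | nil => intro bs; simp
  | cons a as ih =>
    intro bs
    cases bs with
    | nil => simp
    | cons b bs => simpa using ih bs

theorem foldl_hits (low : List Char) :
    ∀ (ps : List Nat) (hs : List Bool), hs.length = bTable.length →
    ps.foldl (fun hs p => List.zipWith
      (fun h (t : String × String × String) =>
        h || PySem.Chars.startswith (List.drop p low) t.1.toList) hs bTable) hs
    = List.zipWith (fun h (t : String × String × String) =>
        h || ps.any (fun p => PySem.Chars.startswith (List.drop p low) t.1.toList)) hs bTable := by
  intro ps
  induction ps with
  | nil =>
    intro hs h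
    simp only [List.foldl_nil, List.any_nil, Bool.or_false]
    exact (zipWith_left_of_len hs bTable (le_of_eq h)).symm
  | cons p ps ih =>
    intro hs h
    rw [List.foldl_cons, ih _ (by simp [h]), zipWith_zipWith_same]
    simp only [List.any_cons, Bool.or_assoc]

theorem any_range_eq_isIn (low k : List Char) (hlow : low ≠ []) :
    (List.range low.length).any (fun p => PySem.Chars.startswith (List.drop p low) k)
    = PySem.Chars.isIn k low := by
  rcases eq_or_ne k [] with rfl | hk
  · rw [PySem.Chars.isIn_nil, List.any_eq_true]
    exact ⟨0, List.mem_range.mpr (List.length_pos_iff.mpr hlow),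
      (PySem.Chars.startswith_iff _ _).mpr (List.nil_prefix)⟩
  · rcases hIn : PySem.Chars.isIn k low with _ | _
    · rw [List.any_eq_false]
      intro p _
      rw [Bool.not_eq_true, Bool.eq_false_iff]
      intro hsw
      have : PySem.Chars.isIn k low = true :=
        (PySem.Chars.exists_prefix_drop_iff_isIn _ _).mp
          ⟨p, (PySem.Chars.startswith_iff _ _).mp hsw⟩
      simp [hIn] at this
    · obtain ⟨j, hj⟩ := (PySem.Chars.exists_prefix_drop_iff_isIn k low).mpr hIn
      have hjlt : j < low.length := by
        by_contra hge
        push Not at hge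
        rw [List.drop_eq_nil_of_le hge] at hj
        exact hk (List.prefix_nil.mp hj)
      rw [List.any_eq_true]
      exact ⟨j, List.mem_range.mpr hjlt, (PySem.Chars.startswith_iff _ _).mpr hj⟩

theorem bHits_eq (low : List Char) (hlow : low ≠ []) :
    bHits low = bTable.map (fun t => PySem.Chars.isIn t.1.toList low) := by
  unfold bHits
  rw [foldl_hits low _ _ (by simp)]
  have : List.zipWith (fun h (t : String × String × String) =>
      h || (List.range low.length).any
        (fun p => PySem.Chars.startswith (List.drop p low) t.1.toList))
      (List.replicate bTable.length false) bTable
      = bTable.map (fun t => false || (List.range low.length).any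
        (fun p => PySem.Chars.startswith (List.drop p low) t.1.toList)) := by
    generalize bTable = bs
    induction bs with
    | nil => simp
    | cons b bs ih => simpa [List.replicate_succ] using ih
  rw [this]
  refine List.map_congr_left (fun t _ => ?_)
  rw [Bool.false_or, any_range_eq_isIn _ _ hlow]

-- ===== VERDICT (by name: the statement is the Claim_ definition above) =====
theorem extract_location_details_spec : Claim_equal_extract_location_details := by
  intro location _
  unfold Spec_extract_location_details
  by_cases h : location = ""
  · subst h; decide
  · have hlow : (PySem.Str.lower location).toList ≠ [] := by
      intro hnil
      apply h
      have := congrArg List.length hnil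
      simp [PySem.Str.toList_lower, PySem.Chars.lower] at this
      exact String.ext (by simpa using this)
    simp only [extract_location_details, extract_location_details_alt, if_neg h]
    rw [bHits_eq _ hlow]
    simp only [bTable, List.map, ← PySem.Str.isIn_eq]
    by_cases h1 : PySem.Str.isIn "bangalore" (PySem.Str.lower location) = true
    · simp only [aLoop, bSelect, h1, if_true]; decide
    by_cases h2 : PySem.Str.isIn "mysore" (PySem.Str.lower location) = true
    · simp only [aLoop, bSelect, h1, h2, if_true]; decide
    by_cases h3 : PySem.Str.isIn "hubli" (PySem.Str.lower location) = true
    · simp only [aLoop, bSelect, h1, h2, h3, if_true]; decide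
    by_cases h4 : PySem.Str.isIn "dharwad" (PySem.Str.lower location) = true
    · simp only [aLoop, bSelect, h1, h2, h3, h4, if_true]; decide
    by_cases h5 : PySem.Str.isIn "belgaum" (PySem.Str.lower location) = true
    · simp only [aLoop, bSelect, h1, h2, h3, h4, h5, if_true]; decide
    by_cases h6 : PySem.Str.isIn "mangalore" (PySem.Str.lower location) = true
    · simp only [aLoop, bSelect, h1, h2, h3, h4, h5, h6, if_true]; decide
    by_cases h7 : PySem.Str.isIn "gulbarga" (PySem.Str.lower location) = true
    · simp only [aLoop, bSelect, h1, h2, h3, h4, h5, h6, h7, if_true]; decide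
    by_cases h8 : PySem.Str.isIn "davangere" (PySem.Str.lower location) = true
    · simp only [aLoop, bSelect, h1, h2, h3, h4, h5, h6, h7, h8, if_true]; decide
    by_cases h9 : PySem.Str.isIn "bellary" (PySem.Str.lower location) = true
    · simp only [aLoop, bSelect, h1, h2, h3, h4, h5, h6, h7, h8, h9, if_true]; decide
    by_cases h10 : PySem.Str.isIn "bijapur" (PySem.Str.lower location) = true
    · simp only [aLoop, bSelect, h1, h2, h3, h4, h5, h6, h7, h8, h9, h10, if_true]; decide
    by_cases h11 : PySem.Str.isIn "shimoga" (PySem.Str.lower location) = true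
    · simp only [aLoop, bSelect, h1, h2, h3, h4, h5, h6, h7, h8, h9, h10, h11, if_true]; decide
    by_cases h12 : PySem.Str.isIn "tumkur" (PySem.Str.lower location) = true
    · simp only [aLoop, bSelect, h1, h2, h3, h4, h5, h6, h7, h8, h9, h10, h11, h12, if_true]; decide
    simp only [aLoop, bSelect, h1, h2, h3, h4, h5, h6, h7, h8, h9, h10, h11, h12]; decide
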